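-- pv_equiv track=rewrite | github.com/Indivicivet/openscad_things | generate_cube_mesh.py | cube_coords
-- ===== SOURCE A (Python) =====
-- def cube_coords(divs):
--     return [
--         (i, j, k)
--         for i in range(divs + 1)
--         for j in range(divs + 1)
--         for k in range(divs + 1)
--         if (
--             i in [0, divs]
--             or j in [0, divs]
--             or k in [0, divs]
--         )
--     ]
-- ===== SOURCE B (Python) =====
-- def cube_coords(divs):
--     out = []
--     for i in range(divs + 1):
--         for j in range(divs + 1):
--             if i == 0 or i == divs or j == 0 or j == divs:
--                 for k in range(divs + 1):
--                     out.append((i, j, k))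
--             else:
--                 out.append((i, j, 0))
--                 out.append((i, j, divs))
--     return out
-- ===== Notes on version B (the rewrite author's own statement) =====
-- stated objective: faster
-- what changed: B never scans the k-axis for interior columns: it emits the full k-range only on boundary rows/columns and otherwise just the two boundary surface points, producing the same lex-ordered list without the cubic interior scan; intended as faster, measured about 29x at the largest size both finished.
import Mathlib
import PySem

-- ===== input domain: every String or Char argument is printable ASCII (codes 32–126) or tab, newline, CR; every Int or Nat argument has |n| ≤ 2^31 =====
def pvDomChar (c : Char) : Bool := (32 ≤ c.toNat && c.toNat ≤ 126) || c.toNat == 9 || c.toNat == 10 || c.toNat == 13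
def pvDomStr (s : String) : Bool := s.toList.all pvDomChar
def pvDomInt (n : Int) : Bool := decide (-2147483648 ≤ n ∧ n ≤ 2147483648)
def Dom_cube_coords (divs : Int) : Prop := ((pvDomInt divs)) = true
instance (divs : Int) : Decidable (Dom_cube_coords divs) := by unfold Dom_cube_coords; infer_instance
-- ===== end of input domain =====

-- B skips the interior k-scan: full k-range only on boundary rows/columns, else only the two boundary surface points per column (intended as faster; measured about 29x at the largest size both finished).

-- ===== PORT A =====
def cube_coords (divs : Int) : List (List Int) :=
  (PySem.List.pyRange 0 (divs + 1) 1).flatMap (fun i =>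
    (PySem.List.pyRange 0 (divs + 1) 1).flatMap (fun j =>
      ((PySem.List.pyRange 0 (divs + 1) 1).filter (fun k =>
        (i == 0 || i == divs) || (j == 0 || j == divs) || (k == 0 || k == divs))).map
        (fun k => [i, j, k])))

-- ===== PORT B =====
def cube_coords_alt (divs : Int) : List (List Int) :=
  (PySem.List.pyRange 0 (divs + 1) 1).foldl (fun out i =>
    (PySem.List.pyRange 0 (divs + 1) 1).foldl (fun out j =>
      if i == 0 || i == divs || j == 0 || j == divs then
        (PySem.List.pyRange 0 (divs + 1) 1).foldl (fun out k => out ++ [[i, j, k]]) out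
      else
        (out ++ [[i, j, 0]]) ++ [[i, j, divs]]) out) []

-- ===== PRECONDITION & SPEC =====
def Spec_cube_coords (divs : Int) (out : List (List Int)) : Prop := out = cube_coords_alt divs
instance (divs : Int) (out : List (List Int)) : Decidable (Spec_cube_coords divs out) := by unfold Spec_cube_coords; infer_instance

-- ===== CLAIM (what is proved, stated in full; the proofs are below) =====
def Claim_equal_cube_coords : Prop := ∀ (divs : Int), Dom_cube_coords divs → Spec_cube_coords divs (cube_coords divs)

-- ===== LEMMAS AND PROOFS =====

-- the branch body of B, as a plain list, per (i, j)
def cubeRow (divs i j : Int) : List (List Int) :=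
  if i == 0 || i == divs || j == 0 || j == divs then
    (PySem.List.pyRange 0 (divs + 1) 1).map (fun k => [i, j, k])
  else [[i, j, 0], [i, j, divs]]

theorem alt_eq_flatMap (divs : Int) :
    cube_coords_alt divs =
      (PySem.List.pyRange 0 (divs + 1) 1).flatMap (fun i =>
        (PySem.List.pyRange 0 (divs + 1) 1).flatMap (fun j => cubeRow divs i j)) := by
  unfold cube_coords_alt
  have h1 : ∀ i : Int, (fun (out : List (List Int)) (j : Int) =>
      if i == 0 || i == divs || j == 0 || j == divs then
        (PySem.List.pyRange 0 (divs + 1) 1).foldl (fun out k => out ++ [[i, j, k]]) out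
      else (out ++ [[i, j, 0]]) ++ [[i, j, divs]])
      = fun out j => out ++ cubeRow divs i j := by
    intro i
    funext out j
    unfold cubeRow
    split
    · exact PySem.List.foldl_append_singleton_eq_map _ _ _
    · simp
  simp only [h1]
  simp only [PySem.List.foldl_append_eq_flatMap]
  simp

theorem row_eq (divs i j : Int)
    (hi : i ∈ PySem.List.pyRange 0 (divs + 1) 1)
    (hj : j ∈ PySem.List.pyRange 0 (divs + 1) 1) :
    ((PySem.List.pyRange 0 (divs + 1) 1).filter (fun k =>
        (i == 0 || i == divs) || (j == 0 || j == divs) || (k == 0 || k == divs))).map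
      (fun k => [i, j, k]) = cubeRow divs i j := by
  rw [PySem.List.mem_pyRange_one] at hi hj
  unfold cubeRow
  by_cases hb : (i == 0 || i == divs || j == 0 || j == divs) = true
  · rw [if_pos hb]
    congr 1
    apply List.filter_eq_self.mpr
    intro k _
    simp only [Bool.or_eq_true, beq_iff_eq] at hb ⊢
    tauto
  · rw [if_neg hb]
    simp only [Bool.or_eq_true, beq_iff_eq, not_or] at hb
    obtain ⟨⟨⟨hi0, hid⟩, hj0⟩, hjd⟩ := hb
    have e0 : PySem.List.pyRange 0 1 1 = [0] := by decide
    have e1 : PySem.List.pyRange 0 (divs + 1) 1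
        = PySem.List.pyRange 0 1 1 ++ PySem.List.pyRange 1 (divs + 1) 1 :=
      PySem.List.pyRange_one_append 0 1 (divs + 1) (by omega) (by omega)
    have e2 : PySem.List.pyRange 1 (divs + 1) 1
        = PySem.List.pyRange 1 divs 1 ++ [divs] :=
      PySem.List.pyRange_one_succ_right (by omega)
    have emid : (PySem.List.pyRange 1 divs 1).filter (fun k =>
        (i == 0 || i == divs) || (j == 0 || j == divs) || (k == 0 || k == divs)) = [] := by
      apply List.filter_eq_nil_iff.mpr
      intro k hk
      rw [PySem.List.mem_pyRange_one] at hk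
      simp only [Bool.or_eq_true, beq_iff_eq, not_or]
      omega
    rw [e1, e2, e0]
    simp only [List.filter_append, emid, List.map_append, List.map_nil]
    simp

-- ===== VERDICT (by name: the statement is the Claim_ definition above) =====
theorem cube_coords_spec : Claim_equal_cube_coords := by
  intro divs _
  unfold Spec_cube_coords cube_coords
  rw [alt_eq_flatMap]
  exact List.flatMap_congr (fun i hi => List.flatMap_congr (fun j hj => row_eq divs i j hi hj))
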